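-- pv_equiv track=rewrite | github.com/LenzGit/OpenAniMusic | gui/staff_processor.py | ridge_from_pixels
-- ===== SOURCE A (Python) =====
-- def ridge_from_pixels(pixels, keep="top"):
--     """
--     Reduziert eine Punktmenge auf den 'Kamm' pro X-Spalte.
--     keep="top"    -> kleinstes y (oberster Pixel)
--     keep="bottom" -> größtes y (unterster Pixel)
--     """
--     ridge = {}
--     for x, y in pixels:
--         if keep == "top":
--             ridge[x] = min(y, ridge.get(x, y))
--         else:                        # bottom
--             ridge[x] = max(y, ridge.get(x, y))
--     return [(x, y) for x, y in ridge.items()]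
-- ===== SOURCE B (Python) =====
-- def ridge_from_pixels(pixels, keep="top"):
--     # Group all y values per x (first-occurrence order), then reduce each column.
--     cols = {}
--     for x, y in pixels:
--         cols.setdefault(x, []).append(y)
--     return [(x, min(ys) if keep == "top" else max(ys)) for x, ys in cols.items()]
-- ===== Notes on version B (the rewrite author's own statement) =====
-- stated objective: alternative
-- what changed: B stores the full list of y values per x-column (group pass) and reduces each column with min/max in a separate second pass, instead of maintaining a running extremum in the dict as A does.
import Mathlib
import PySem

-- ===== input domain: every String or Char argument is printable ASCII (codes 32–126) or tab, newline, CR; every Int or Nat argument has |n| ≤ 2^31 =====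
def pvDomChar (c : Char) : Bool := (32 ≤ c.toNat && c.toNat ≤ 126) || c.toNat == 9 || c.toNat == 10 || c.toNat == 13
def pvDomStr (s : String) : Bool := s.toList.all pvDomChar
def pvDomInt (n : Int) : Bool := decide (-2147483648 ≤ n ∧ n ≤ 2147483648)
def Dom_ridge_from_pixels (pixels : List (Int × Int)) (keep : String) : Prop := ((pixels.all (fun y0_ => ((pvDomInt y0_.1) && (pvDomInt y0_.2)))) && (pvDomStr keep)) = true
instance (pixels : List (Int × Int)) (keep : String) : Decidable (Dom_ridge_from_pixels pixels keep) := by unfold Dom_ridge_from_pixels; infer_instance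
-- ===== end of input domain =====

-- B groups all y values per x-column first and reduces each column with min/max in a
-- second pass, instead of A's running extremum per key; an alternative decomposition,
-- same cost; return values proved equal on all inputs.

-- ===== PORT A =====
def ridge_from_pixels (pixels : List (Int × Int)) (keep : String) : List (Int × Int) :=
  (pixels.foldl (fun d p =>
      if keep == "top" then d.insert p.1 (min p.2 (d.getD p.1 p.2))
      else d.insert p.1 (max p.2 (d.getD p.1 p.2)))
    PySem.Dict.empty).items

-- ===== PORT B =====
-- min(ys)/max(ys); ys is always nonempty here, so the `.getD 0` default is never used.
def pvRed (keep : String) (ys : List Int) : Int :=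
  if keep == "top" then (PySem.List.min? ys (fun v => v)).getD 0
  else (PySem.List.max? ys (fun v => v)).getD 0

def ridge_from_pixels_alt (pixels : List (Int × Int)) (keep : String) : List (Int × Int) :=
  let cols := pixels.foldl (fun d p => d.modify p.1 [] (fun ys => ys ++ [p.2])) PySem.Dict.empty
  cols.items.map (fun p => (p.1, pvRed keep p.2))

-- ===== PRECONDITION & SPEC =====
def Spec_ridge_from_pixels (pixels : List (Int × Int)) (keep : String) (out : List (Int × Int)) : Prop := out = ridge_from_pixels_alt pixels keep
instance (pixels : List (Int × Int)) (keep : String) (out : List (Int × Int)) : Decidable (Spec_ridge_from_pixels pixels keep out) := by unfold Spec_ridge_from_pixels; infer_instance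

-- ===== CLAIM (what is proved, stated in full; the proofs are below) =====
def Claim_equal_ridge_from_pixels : Prop := ∀ (pixels : List (Int × Int)) (keep : String), Dom_ridge_from_pixels pixels keep → Spec_ridge_from_pixels pixels keep (ridge_from_pixels pixels keep)

-- ===== LEMMAS AND PROOFS =====

theorem pvRed_singleton (keep : String) (y : Int) : pvRed keep [y] = y := by
  simp [pvRed, PySem.List.min?_id_cons, PySem.List.max?_id_cons]

theorem pvRed_append (keep : String) (ys : List Int) (y : Int) (h : ys ≠ []) :
    pvRed keep (ys ++ [y]) =
      if keep == "top" then min y (pvRed keep ys) else max y (pvRed keep ys) := by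
  cases ys with
  | nil => exact absurd rfl h
  | cons a t =>
      simp [pvRed, PySem.List.min?_id_cons, PySem.List.max?_id_cons, List.foldl_append]
      split <;> simp [min_comm, max_comm]

theorem get?_mk_map (l : List (Int × List Int)) (f : List Int → Int) (k : Int) :
    (PySem.Dict.mk (l.map (fun p => (p.1, f p.2)))).get? k
      = ((PySem.Dict.mk l).get? k).map f := by
  induction l with
  | nil => rfl
  | cons p t ih =>
      show (PySem.Dict.mk ((p.1, f p.2) :: t.map (fun p => (p.1, f p.2)))).get? k
        = ((PySem.Dict.mk (p :: t)).get? k).map f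
      rw [PySem.Dict.get?_mk_cons, PySem.Dict.get?_mk_cons]
      split <;> simp [ih]

theorem get?_of_items_map (keep : String) (g : PySem.Dict Int (List Int))
    (r : PySem.Dict Int Int)
    (h : r.items = g.items.map (fun p => (p.1, pvRed keep p.2))) (k : Int) :
    r.get? k = (g.get? k).map (pvRed keep) := by
  have hr : r = PySem.Dict.mk (g.items.map (fun p => (p.1, pvRed keep p.2))) := by
    cases r; cases g; simpa using h
  rw [hr, get?_mk_map]

theorem ridge_invariant (keep : String) (pixels : List (Int × Int))
    (g : PySem.Dict Int (List Int)) (r : PySem.Dict Int Int)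
    (hitems : r.items = g.items.map (fun p => (p.1, pvRed keep p.2)))
    (hne : ∀ p ∈ g.items, p.2 ≠ []) :
    (pixels.foldl (fun d p =>
        if keep == "top" then d.insert p.1 (min p.2 (d.getD p.1 p.2))
        else d.insert p.1 (max p.2 (d.getD p.1 p.2))) r).items
      = ((pixels.foldl (fun d p => d.modify p.1 [] (fun ys => ys ++ [p.2])) g).items).map
          (fun p => (p.1, pvRed keep p.2)) := by
  induction pixels generalizing g r with
  | nil => simpa using hitems
  | cons px rest ih =>
      obtain ⟨x, y⟩ := px
      simp only [List.foldl_cons]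
      -- the two one-step-updated dicts
      set g' := g.modify x [] (fun ys => ys ++ [y]) with hg'
      set r' := (if keep == "top" then r.insert x (min y (r.getD x y))
                 else r.insert x (max y (r.getD x y))) with hr'
      have hget := get?_of_items_map keep g r hitems
      have hcont : r.contains x = g.contains x := by
        rw [PySem.Dict.contains_eq_isSome_get?, PySem.Dict.contains_eq_isSome_get?, hget]
        cases g.get? x <;> rfl
      have hmod : g' = g.insert x (g.getD x [] ++ [y]) := rfl
      -- the A-side new value equals the reduction of the B-side new value
      have hval : (if keep == "top" then min y (r.getD x y) else max y (r.getD x y))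
          = pvRed keep (g.getD x [] ++ [y]) := by
        cases hcg : g.get? x with
        | none =>
            have hcf : g.contains x = false := by
              rw [PySem.Dict.contains_eq_isSome_get?, hcg]; rfl
            have hrg : r.getD x y = y := by
              rw [PySem.Dict.getD_eq_get?_getD, hget x, hcg]; rfl
            have hgd : g.getD x [] = [] := by
              rw [PySem.Dict.getD_eq_get?_getD, hcg]; rfl
            simp [hrg, hgd, pvRed_singleton]
        | some ys =>
            have hysne : ys ≠ [] :=
              hne (x, ys) (PySem.Dict.mem_items_of_get?_eq_some g hcg)
            have hrg : r.getD x y = pvRed keep ys := by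
              rw [PySem.Dict.getD_eq_get?_getD, hget x, hcg]; rfl
            have hgd : g.getD x [] = ys := by
              rw [PySem.Dict.getD_eq_get?_getD, hcg]; rfl
            rw [hrg, hgd, pvRed_append keep ys y hysne]
      simp only [beq_iff_eq] at hval
      apply ih
      · -- items relation is preserved
        by_cases hc : g.contains x = true
        · have hrc : r.contains x = true := by rw [hcont]; exact hc
          rw [hmod, PySem.Dict.items_insert_of_contains _ _ hc]
          have hA : r'.items
              = r.items.map (fun p => if p.1 == x then
                  (x, if keep == "top" then min y (r.getD x y) else max y (r.getD x y))
                  else p) := by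
            rw [hr']
            split <;> rw [PySem.Dict.items_insert_of_contains _ _ hrc]
          rw [hA, hitems, List.map_map, List.map_map]
          apply List.map_congr_left
          intro p _
          by_cases hpx : p.1 == x
          · simp [Function.comp, hpx, hval]
          · simp [Function.comp, hpx]
        · have hcf : g.contains x = false := by simpa using hc
          have hrc : r.contains x = false := by rw [hcont]; exact hcf
          rw [hmod, PySem.Dict.items_insert_of_not_contains _ _ hcf]
          have hA : r'.items
              = r.items ++ [(x, if keep == "top" then min y (r.getD x y)
                                else max y (r.getD x y))] := by
            rw [hr']
            split <;> rw [PySem.Dict.items_insert_of_not_contains _ _ hrc]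
          rw [hA, hitems, List.map_append]
          simp [hval]
      · -- all stored column lists stay nonempty
        intro p hp
        rw [hmod] at hp
        rcases (PySem.Dict.mem_items_insert g x (g.getD x [] ++ [y]) p).mp hp with hpe | ⟨hpm, _⟩
        · subst hpe; simp
        · exact hne p hpm

-- ===== VERDICT (by name: the statement is the Claim_ definition above) =====
theorem ridge_from_pixels_spec : Claim_equal_ridge_from_pixels := by
  intro pixels keep _
  show ridge_from_pixels pixels keep = ridge_from_pixels_alt pixels keep
  unfold ridge_from_pixels ridge_from_pixels_alt
  exact ridge_invariant keep pixels PySem.Dict.empty PySem.Dict.empty (by rfl) (by simp [PySem.Dict.empty])
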